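-- pv_equiv track=rewrite | github.com/plugwise/python-plugwise | plugwise/nodes/energy.py | calc_log_address
-- ===== SOURCE A (Python) =====
-- def calc_log_address(address: int, slot: int, offset: int) -> tuple:
--     """Calculate address and slot for log based for specified offset"""
--
--     # FIXME: Handle max address (max is currently unknown) to guard against address rollovers
--     if offset < 0:
--         while offset + slot < 1:
--             address -= 1
--             offset += 4
--     if offset > 0:
--         while offset + slot > 4:
--             address += 1
--             offset -= 4
--     return (address, slot + offset)
-- ===== SOURCE B (Python) =====
-- def calc_log_address(address: int, slot: int, offset: int) -> tuple:
--     """Calculate address and slot for log based for specified offset (closed form)."""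
--     s = slot + offset
--     if offset < 0 and s < 1:
--         k = (4 - s) // 4          # number of 4-steps down = ceil((1 - s) / 4)
--         return (address - k, s + 4 * k)
--     if offset > 0 and s > 4:
--         k = (s - 1) // 4          # number of 4-steps up = ceil((s - 4) / 4)
--         return (address + k, s - 4 * k)
--     return (address, s)
-- ===== Notes on version B (the rewrite author's own statement) =====
-- stated objective: faster
-- what changed: Replaced A's two while loops that step the offset by 4 one iteration at a time with a single closed-form ceiling-division computation of the number of steps.
import Mathlib
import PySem

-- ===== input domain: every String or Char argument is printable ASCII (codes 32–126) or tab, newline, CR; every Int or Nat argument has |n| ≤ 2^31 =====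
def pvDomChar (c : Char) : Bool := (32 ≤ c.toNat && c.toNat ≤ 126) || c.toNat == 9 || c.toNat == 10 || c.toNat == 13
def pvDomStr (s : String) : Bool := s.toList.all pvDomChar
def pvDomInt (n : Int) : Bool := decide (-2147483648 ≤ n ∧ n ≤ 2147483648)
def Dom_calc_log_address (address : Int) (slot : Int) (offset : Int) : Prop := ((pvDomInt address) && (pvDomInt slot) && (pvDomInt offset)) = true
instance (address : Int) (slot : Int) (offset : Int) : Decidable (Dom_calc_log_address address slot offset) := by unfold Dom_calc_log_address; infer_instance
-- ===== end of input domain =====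

-- B replaces A's two step-by-4 while loops with O(1) ceiling-division arithmetic (objective: faster).

-- ===== PORT A =====
-- first while loop of A: while offset + slot < 1: address -= 1; offset += 4
def pvLoopDown (address : Int) (slot : Int) (offset : Int) : Int × Int :=
  if offset + slot < 1 then pvLoopDown (address - 1) slot (offset + 4)
  else (address, offset)
termination_by (1 - offset - slot).toNat
decreasing_by omega

-- second while loop of A: while offset + slot > 4: address += 1; offset -= 4
def pvLoopUp (address : Int) (slot : Int) (offset : Int) : Int × Int :=
  if offset + slot > 4 then pvLoopUp (address + 1) slot (offset - 4)
  else (address, offset)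
termination_by (offset + slot - 4).toNat
decreasing_by omega

def calc_log_address (address : Int) (slot : Int) (offset : Int) : Int × Int :=
  let p1 := if offset < 0 then pvLoopDown address slot offset else (address, offset)
  let p2 := if p1.2 > 0 then pvLoopUp p1.1 slot p1.2 else p1
  (p2.1, slot + p2.2)

-- ===== PORT B =====
def calc_log_address_alt (address : Int) (slot : Int) (offset : Int) : Int × Int :=
  let s := slot + offset
  if offset < 0 ∧ s < 1 then
    let k := PySem.Int.floordiv (4 - s) 4
    (address - k, s + 4 * k)
  else if offset > 0 ∧ s > 4 then
    let k := PySem.Int.floordiv (s - 1) 4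
    (address + k, s - 4 * k)
  else (address, s)

-- ===== PRECONDITION & SPEC =====
def Spec_calc_log_address (address : Int) (slot : Int) (offset : Int) (out : Int × Int) : Prop := out = calc_log_address_alt address slot offset
instance (address : Int) (slot : Int) (offset : Int) (out : Int × Int) : Decidable (Spec_calc_log_address address slot offset out) := by unfold Spec_calc_log_address; infer_instance

-- ===== CLAIM (what is proved, stated in full; the proofs are below) =====
def Claim_equal_calc_log_address : Prop := ∀ (address : Int) (slot : Int) (offset : Int), Dom_calc_log_address address slot offset → Spec_calc_log_address address slot offset (calc_log_address address slot offset)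

-- ===== LEMMAS AND PROOFS =====

-- Closed form of A's first loop: k is the least number of +4 steps making offset+slot ≥ 1.
theorem pvLoopDown_eq (address slot offset k : Int) (hk : 0 ≤ k)
    (h1 : 1 ≤ offset + 4 * k + slot) (h2 : k = 0 ∨ offset + 4 * k + slot ≤ 4) :
    pvLoopDown address slot offset = (address - k, offset + 4 * k) := by
  fun_induction pvLoopDown address slot offset generalizing k with
  | case1 a s o ih =>
    have hk1 : 1 ≤ k := by omega
    rw [ih (k - 1) (by omega) (by omega) (by omega)]
    try dsimp only
    simp only [Prod.mk.injEq, true_and, and_true]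
    omega
  | case2 a s o =>
    have hk0 : k = 0 := by omega
    subst hk0
    simp

-- Closed form of A's second loop: k is the least number of -4 steps making offset+slot ≤ 4.
theorem pvLoopUp_eq (address slot offset k : Int) (hk : 0 ≤ k)
    (h1 : offset - 4 * k + slot ≤ 4) (h2 : k = 0 ∨ 1 ≤ offset - 4 * k + slot) :
    pvLoopUp address slot offset = (address + k, offset - 4 * k) := by
  fun_induction pvLoopUp address slot offset generalizing k with
  | case1 a s o ih =>
    have hk1 : 1 ≤ k := by omega
    rw [ih (k - 1) (by omega) (by omega) (by omega)]
    try dsimp only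
    simp only [Prod.mk.injEq, true_and, and_true]
    omega
  | case2 a s o =>
    have hk0 : k = 0 := by omega
    subst hk0
    simp

-- ===== VERDICT (by name: the statement is the Claim_ definition above) =====
theorem calc_log_address_spec : Claim_equal_calc_log_address := by
  intro address slot offset _
  unfold Spec_calc_log_address calc_log_address calc_log_address_alt
  dsimp only
  by_cases hneg : offset < 0
  · by_cases hs : slot + offset < 1
    · -- A runs the first loop; B's k satisfies the loop's closed-form bounds
      have hb : PySem.Int.floordiv (4 - (slot + offset)) 4 * 4 ≤ 4 - (slot + offset) ∧
          4 - (slot + offset) < (PySem.Int.floordiv (4 - (slot + offset)) 4 + 1) * 4 :=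
        (PySem.Int.floordiv_eq_iff_of_pos (by norm_num)).mp rfl
      generalize hkdef : PySem.Int.floordiv (4 - (slot + offset)) 4 = k at hb ⊢
      rw [if_pos hneg, pvLoopDown_eq address slot offset k (by omega) (by omega) (by omega),
        if_pos (show (offset : Int) < 0 ∧ slot + offset < 1 from ⟨hneg, hs⟩)]
      by_cases hp : offset + 4 * k > 0
      · rw [if_pos hp,
          pvLoopUp_eq (address - k) slot (offset + 4 * k) 0 (by omega) (by omega) (by omega)]
        try dsimp only
        simp only [Prod.mk.injEq, true_and, and_true]
        omega
      · rw [if_neg hp]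
        try dsimp only
        simp only [Prod.mk.injEq, true_and, and_true]
        omega
    · -- offset < 0 but slot+offset ≥ 1: the first loop exits immediately, second never runs
      rw [if_pos hneg, pvLoopDown_eq address slot offset 0 (by omega) (by omega) (by omega),
        if_neg (show ¬((offset + 4 * 0 : Int) > 0) by omega),
        if_neg (show ¬((offset : Int) < 0 ∧ slot + offset < 1) by omega),
        if_neg (show ¬((offset : Int) > 0 ∧ slot + offset > 4) by omega)]
      try dsimp only
      simp only [Prod.mk.injEq, true_and, and_true]
      omega
  · -- offset ≥ 0: the first loop is skipped
    rw [if_neg hneg]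
    by_cases hp : offset > 0
    · by_cases hs : slot + offset > 4
      · have hb : PySem.Int.floordiv (slot + offset - 1) 4 * 4 ≤ slot + offset - 1 ∧
            slot + offset - 1 < (PySem.Int.floordiv (slot + offset - 1) 4 + 1) * 4 :=
          (PySem.Int.floordiv_eq_iff_of_pos (by norm_num)).mp rfl
        generalize hkdef : PySem.Int.floordiv (slot + offset - 1) 4 = k at hb ⊢
        rw [if_pos hp, pvLoopUp_eq address slot offset k (by omega) (by omega) (by omega),
          if_neg (show ¬((offset : Int) < 0 ∧ slot + offset < 1) by omega),
          if_pos (show (offset : Int) > 0 ∧ slot + offset > 4 from ⟨hp, hs⟩)]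
        try dsimp only
        simp only [Prod.mk.injEq, true_and, and_true]
        omega
      · rw [if_pos hp, pvLoopUp_eq address slot offset 0 (by omega) (by omega) (by omega),
          if_neg (show ¬((offset : Int) < 0 ∧ slot + offset < 1) by omega),
          if_neg (show ¬((offset : Int) > 0 ∧ slot + offset > 4) by omega)]
        try dsimp only
        simp only [Prod.mk.injEq, true_and, and_true]
        omega
    · rw [if_neg hp,
        if_neg (show ¬((offset : Int) < 0 ∧ slot + offset < 1) by omega),
        if_neg (show ¬((offset : Int) > 0 ∧ slot + offset > 4) by omega)]
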